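-- pv_equiv track=rewrite | github.com/fromozuzhouzzz/StockAnal_Sys-main | rate_limiter.py | get_user_tier
-- ===== SOURCE A (Python) =====
-- def get_user_tier(api_key):
--     """根据API密钥获取用户等级"""
--     # 这里可以从数据库或配置文件中获取用户等级
--     # 暂时使用简单的映射
--     tier_mapping = {
--         'enterprise_': 'enterprise',
--         'paid_': 'paid',
--         'free_': 'free'
--     }
--
--     for prefix, tier in tier_mapping.items():
--         if api_key.startswith(prefix):
--             return tier
--
--     return 'free'  # 默认为免费用户
-- ===== SOURCE B (Python) =====
-- def get_user_tier(api_key):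
--     """根据API密钥获取用户等级"""
--     tier_mapping = {
--         'enterprise_': 'enterprise',
--         'paid_': 'paid',
--         'free_': 'free'
--     }
--     # take the key up to and including its first underscore; one hash lookup
--     stem = api_key[:api_key.find('_') + 1]
--     return tier_mapping.get(stem, 'free')
-- ===== Notes on version B (the rewrite author's own statement) =====
-- stated objective: idiomatic
-- what changed: Replaces the ordered startswith scan over the mapping with extracting the key's segment up to its first underscore once and doing a single dict lookup (no-underscore keys yield the empty stem and fall through to 'free').
import Mathlib
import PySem

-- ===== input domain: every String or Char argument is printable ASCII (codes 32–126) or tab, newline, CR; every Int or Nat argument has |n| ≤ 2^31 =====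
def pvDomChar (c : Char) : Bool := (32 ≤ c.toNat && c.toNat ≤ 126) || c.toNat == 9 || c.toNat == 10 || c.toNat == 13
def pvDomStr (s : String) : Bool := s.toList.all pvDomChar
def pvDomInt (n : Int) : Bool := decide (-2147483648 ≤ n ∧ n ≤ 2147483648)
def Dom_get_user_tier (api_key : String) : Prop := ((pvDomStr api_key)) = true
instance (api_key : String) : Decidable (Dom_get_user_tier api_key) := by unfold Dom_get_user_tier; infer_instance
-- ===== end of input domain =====

-- B replaces the ordered startswith scan with one first-underscore segment extraction and a single dict lookup (idiomatic, same cost).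


-- ===== PORT A =====
-- the 'for prefix, tier in tier_mapping.items(): if api_key.startswith(prefix): return tier' loop
def pvLoopA (api_key : String) : List (String × String) → Option String
  | [] => none
  | (pre, tier) :: rest =>
      if PySem.Str.startswith api_key pre then some tier else pvLoopA api_key rest

def get_user_tier (api_key : String) : String :=
  let tier_mapping : PySem.Dict String String :=
    PySem.Dict.ofList [("enterprise_", "enterprise"), ("paid_", "paid"), ("free_", "free")]
  (pvLoopA api_key tier_mapping.items).getD "free"

-- ===== PORT B =====
def get_user_tier_alt (api_key : String) : String :=
  let tier_mapping : PySem.Dict String String :=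
    PySem.Dict.ofList [("enterprise_", "enterprise"), ("paid_", "paid"), ("free_", "free")]
  let stem := PySem.Str.slice api_key none (some (PySem.Str.find api_key "_" + 1))
  tier_mapping.getD stem "free"

-- ===== PRECONDITION & SPEC =====
def Spec_get_user_tier (api_key : String) (out : String) : Prop := out = get_user_tier_alt api_key
instance (api_key : String) (out : String) : Decidable (Spec_get_user_tier api_key out) := by unfold Spec_get_user_tier; infer_instance

-- ===== CLAIM (what is proved, stated in full; the proofs are below) =====
def Claim_equal_get_user_tier : Prop := ∀ (api_key : String), Dom_get_user_tier api_key → Spec_get_user_tier api_key (get_user_tier api_key)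

-- ===== LEMMAS AND PROOFS =====

theorem pv_prefix_getElem? (l1 l2 : List Char) (h : l1 <+: l2) (i : Nat) (hi : i < l1.length) :
    l2[i]? = l1[i]? := by
  obtain ⟨t, rfl⟩ := h
  rw [List.getElem?_append_left hi]

theorem pv_single_prefix_iff (l : List Char) (i : Nat) :
    ([ '_' ] <+: l.drop i) ↔ l[i]? = some '_' := by
  rw [← List.head?_drop]
  cases l.drop i with
  | nil => simp
  | cons x xs => simp [List.cons_prefix_cons, eq_comm]

theorem pv_find_eq (l : List Char) (j : Nat)
    (h1 : l[j]? = some '_') (h2 : ∀ i < j, l[i]? ≠ some '_') :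
    PySem.Chars.find l ['_'] = (j : Int) := by
  have hinf : (['_'] : List Char) <:+: l := by
    have := (pv_single_prefix_iff l j).2 h1
    exact this.isInfix.trans (List.drop_suffix j l).isInfix
  have hge : 0 ≤ PySem.Chars.find l ['_'] := (PySem.Chars.find_nonneg_iff l ['_']).2 hinf
  obtain ⟨hocc, hmin⟩ := PySem.Chars.find_spec hge
  set f := PySem.Chars.find l ['_'] with hf
  rcases lt_trichotomy f.toNat j with h | h | h
  · exact absurd ((pv_single_prefix_iff l f.toNat).1 hocc) (h2 _ h)
  · omega
  · exact absurd ((pv_single_prefix_iff l j).2 h1) (hmin j h)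

theorem pv_stem_eq_iff (l p : List Char) (hp : '_' ∉ p) :
    PySem.List.slice l none (some (PySem.Chars.find l ['_'] + 1)) = p ++ ['_'] ↔ (p ++ ['_']) <+: l := by
  have hle := PySem.Chars.neg_one_le_find l ['_']
  rcases hle.eq_or_lt with heq | hpos
  · have h0 : PySem.Chars.find l ['_'] + 1 = 0 := by omega
    rw [h0, PySem.List.slice_to l (le_refl 0)]
    simp only [Int.toNat_zero, List.take_zero]
    constructor
    · intro h; exact absurd h.symm (by simp)
    · intro h
      have hmem : '_' ∈ l := h.subset (by simp)
      have := (PySem.Chars.find_ne_neg_one_iff l ['_']).2 ((List.singleton_infix_iff _ _).2 hmem)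
      omega
  · have h0 : (0:Int) ≤ PySem.Chars.find l ['_'] + 1 := by omega
    rw [PySem.List.slice_to l h0]
    have htn : (PySem.Chars.find l ['_'] + 1).toNat = (PySem.Chars.find l ['_']).toNat + 1 := by omega
    rw [htn]
    constructor
    · intro h; rw [← h]; exact List.take_prefix _ _
    · intro h
      have hf : PySem.Chars.find l ['_'] = (p.length : Int) := by
        apply pv_find_eq
        · have hg := pv_prefix_getElem? _ _ h p.length (by simp)
          rw [hg, List.getElem?_append_right (le_refl _)]
          simp
        · intro i hi hc
          have hg := pv_prefix_getElem? _ _ h i (by simp; omega)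
          rw [hg, List.getElem?_append_left hi] at hc
          exact hp (List.mem_of_getElem? hc)
      rw [hf]
      simp only [Int.toNat_natCast]
      have := List.prefix_iff_eq_take.mp h
      simpa using this.symm

theorem pv_hiff (s P : String) (p : List Char) (hP : P.toList = p ++ ['_']) (hp : '_' ∉ p) :
    (PySem.Str.startswith s P = true ↔ PySem.Str.slice s none (some (PySem.Str.find s "_" + 1)) = P) := by
  have hl : (PySem.Str.slice s none (some (PySem.Str.find s "_" + 1))).toList
      = PySem.List.slice s.toList none (some (PySem.Chars.find s.toList ['_'] + 1)) := by simp [pysem]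
  have hsw : PySem.Str.startswith s P = true ↔ P.toList <+: s.toList := by simp [pysem]
  rw [hsw, ← String.toList_inj, hl, hP]
  exact (pv_stem_eq_iff s.toList p hp).symm

theorem pv_dict_eval (st : String) :
    PySem.Dict.getD (PySem.Dict.ofList [("enterprise_", "enterprise"), ("paid_", "paid"), ("free_", "free")]) st "free"
    = (if st = "enterprise_" then "enterprise" else if st = "paid_" then "paid" else if st = "free_" then "free" else "free") := by
  by_cases h1 : st = "enterprise_"
  · subst h1; decide
  by_cases h2 : st = "paid_"
  · subst h2; decide
  by_cases h3 : st = "free_"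
  · subst h3; decide
  have h : PySem.Dict.ofList [("enterprise_", "enterprise"), ("paid_", "paid"), ("free_", "free")]
      = PySem.Dict.mk [("enterprise_", "enterprise"), ("paid_", "paid"), ("free_", "free")] := by decide
  rw [h, PySem.Dict.getD, PySem.Dict.get?_mk_cons, PySem.Dict.get?_mk_cons, PySem.Dict.get?_mk_cons,
    if_neg (by simp only [beq_iff_eq]; exact fun hh => h1 hh.symm),
    if_neg (by simp only [beq_iff_eq]; exact fun hh => h2 hh.symm),
    if_neg (by simp only [beq_iff_eq]; exact fun hh => h3 hh.symm),
    if_neg h1, if_neg h2, if_neg h3]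
  rfl

theorem pv_main (s : String) : get_user_tier s = get_user_tier_alt s := by
  have he := pv_hiff s "enterprise_" "enterprise".toList (by decide) (by decide)
  have hpd := pv_hiff s "paid_" "paid".toList (by decide) (by decide)
  have hfr := pv_hiff s "free_" "free".toList (by decide) (by decide)
  unfold get_user_tier get_user_tier_alt
  rw [pv_dict_eval]
  have hitems : (PySem.Dict.ofList [("enterprise_", "enterprise"), ("paid_", "paid"), ("free_", "free")] :
      PySem.Dict String String).items
      = [("enterprise_", "enterprise"), ("paid_", "paid"), ("free_", "free")] := by decide
  simp only [hitems]
  unfold pvLoopA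
  by_cases h1 : PySem.Str.startswith s "enterprise_" = true
  · rw [if_pos h1, if_pos (he.mp h1)]; rfl
  rw [if_neg h1, if_neg (fun hh => h1 (he.mpr hh))]
  unfold pvLoopA
  by_cases h2 : PySem.Str.startswith s "paid_" = true
  · rw [if_pos h2, if_pos (hpd.mp h2)]; rfl
  rw [if_neg h2, if_neg (fun hh => h2 (hpd.mpr hh))]
  unfold pvLoopA
  by_cases h3 : PySem.Str.startswith s "free_" = true
  · rw [if_pos h3, if_pos (hfr.mp h3)]; rfl
  rw [if_neg h3, if_neg (fun hh => h3 (hfr.mpr hh))]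
  rfl

-- ===== VERDICT (by name: the statement is the Claim_ definition above) =====
theorem get_user_tier_spec : Claim_equal_get_user_tier := by
  intro s _
  unfold Spec_get_user_tier
  exact pv_main s
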